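-- pv_equiv track=rewrite | github.com/Mefodii/AdventOfCode_2019 | days/day_4.py | filter_adjacent
-- ===== SOURCE A (Python) =====
-- def filter_adjacent(keys):
--     valid_keys = []
--     for key in keys:
--         adjacent_count = 0
--         prev_digit = ""
--         has_two_adjacent = False
--         for digit in key:
--             if digit == prev_digit:
--                 adjacent_count += 1
--             else:
--                 if adjacent_count == 2:
--                     has_two_adjacent = True
--                 prev_digit = digit
--                 adjacent_count = 1
--         if adjacent_count == 2:
--             has_two_adjacent = True
--
--         if has_two_adjacent:
--             valid_keys.append(key)
--
--     return valid_keys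
-- ===== SOURCE B (Python) =====
-- def filter_adjacent(keys):
--     valid_keys = []
--     for key in keys:
--         t = "\0" + key + "\0"
--         if any(a != b and b == c and c != d
--                for a, b, c, d in zip(t, t[1:], t[2:], t[3:])):
--             valid_keys.append(key)
--     return valid_keys
-- ===== Notes on version B (the rewrite author's own statement) =====
-- stated objective: alternative
-- what changed: Instead of A's running prev_digit/adjacent_count state machine with a post-loop flush, B pads each key with a sentinel and detects an exact pair locally, as a 4-character window pattern a!=b==c!=d over four zipped shifted copies of the padded string: no run counting and no carried state.
import Mathlib
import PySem

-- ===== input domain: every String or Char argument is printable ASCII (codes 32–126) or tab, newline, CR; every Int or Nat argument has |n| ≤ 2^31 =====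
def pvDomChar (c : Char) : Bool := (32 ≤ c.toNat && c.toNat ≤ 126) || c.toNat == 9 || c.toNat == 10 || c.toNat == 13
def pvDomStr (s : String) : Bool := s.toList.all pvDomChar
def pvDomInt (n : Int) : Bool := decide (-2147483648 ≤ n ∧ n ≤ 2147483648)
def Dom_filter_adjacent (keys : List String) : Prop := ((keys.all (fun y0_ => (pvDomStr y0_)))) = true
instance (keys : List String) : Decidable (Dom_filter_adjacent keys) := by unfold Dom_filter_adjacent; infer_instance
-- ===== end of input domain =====

-- B replaces A's running run-length state machine by a sentinel-padded 4-char window pattern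
-- (a!=b==c!=d over zipped shifted copies); alternative decomposition, same cost.

-- ===== PORT A =====
-- per-key inner loop state: (adjacent_count, prev_digit, has_two_adjacent);
-- Python's initial prev_digit = "" never equals a single char, modelled as Option Char = none.
def pvStepA (st : Nat × Option Char × Bool) (d : Char) : Nat × Option Char × Bool :=
  if some d = st.2.1 then (st.1 + 1, st.2.1, st.2.2)
  else (1, some d, if st.1 = 2 then true else st.2.2)

-- the post-loop flush: if adjacent_count == 2 then has_two_adjacent = True
def pvCheckA (s : List Char) : Bool :=
  let st := s.foldl pvStepA (0, none, false)
  if st.1 = 2 then true else st.2.2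

def filter_adjacent (keys : List String) : List String :=
  keys.foldl (fun valid_keys key =>
    if pvCheckA key.toList then valid_keys ++ [key] else valid_keys) []

-- ===== PORT B =====
-- Python zip of four lists (stops at the shortest), ported literally
def pvZip4 {α : Type} : List α → List α → List α → List α → List (α × α × α × α)
  | a :: as, b :: bs, c :: cs, d :: ds => (a, b, c, d) :: pvZip4 as bs cs ds
  | _, _, _, _ => []

-- t = "\0" + key + "\0"; t[1:], t[2:], t[3:] are List.drop (exact for nonnegative slice starts);
-- any(a != b and b == c and c != d for ...) over the zipped shifted copies
def pvCheckB (s : List Char) : Bool :=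
  let t : List Char := '\x00' :: (s ++ ['\x00'])
  (pvZip4 t (t.drop 1) (t.drop 2) (t.drop 3)).any
    (fun w => w.1 != w.2.1 && w.2.1 == w.2.2.1 && w.2.2.1 != w.2.2.2)

def filter_adjacent_alt (keys : List String) : List String :=
  keys.foldl (fun valid_keys key =>
    if pvCheckB key.toList then valid_keys ++ [key] else valid_keys) []

-- ===== PRECONDITION & SPEC =====
def Spec_filter_adjacent (keys : List String) (out : List String) : Prop := out = filter_adjacent_alt keys
instance (keys : List String) (out : List String) : Decidable (Spec_filter_adjacent keys out) := by unfold Spec_filter_adjacent; infer_instance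

-- ===== CLAIM (what is proved, stated in full; the proofs are below) =====
def Claim_equal_filter_adjacent : Prop := ∀ (keys : List String), Dom_filter_adjacent keys → Spec_filter_adjacent keys (filter_adjacent keys)

-- ===== LEMMAS AND PROOFS =====

-- sliding 4-window "any", the recursive reading of B's zipped any
def pvWin : List Char → Bool
  | a :: b :: c :: d :: r => (a != b && b == c && c != d) || pvWin (b :: c :: d :: r)
  | _ => false
termination_by t => t.length
decreasing_by simp

theorem pvZip4_any_eq (t : List Char) :
    (pvZip4 t (t.drop 1) (t.drop 2) (t.drop 3)).any
      (fun w => w.1 != w.2.1 && w.2.1 == w.2.2.1 && w.2.2.1 != w.2.2.2) = pvWin t := by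
  induction t using pvWin.induct with
  | case1 a b c d r ih =>
      simp only [List.drop_succ_cons, List.drop_zero, pvZip4, List.any_cons] at *
      rw [ih, pvWin]
  | case2 t h1 =>
      rcases t with _ | ⟨a, _ | ⟨b, _ | ⟨c, _ | ⟨d, r⟩⟩⟩⟩
      · simp [pvZip4, pvWin]
      · simp [pvZip4, pvWin]
      · simp [pvZip4, pvWin]
      · simp [pvZip4, pvWin]
      · exact absurd rfl (h1 a b c d r)

-- a pure run of p followed by d ≠ p: leading copies of p beyond the first are invisible to pvWin
theorem pvWin_replicate (k : Nat) : ∀ (u : List Char) (p d : Char), d ≠ p →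
    pvWin (p :: (List.replicate k p ++ (d :: u))) = pvWin (p :: d :: u) := by
  induction k with
  | zero => intro u p d _; simp
  | succ k ih =>
      intro u p d hd
      cases k with
      | zero =>
          cases u with
          | nil => simp [pvWin]
          | cons u0 u' => simp [pvWin]
      | succ k' =>
          rcases hx : List.replicate k' p ++ d :: u with _ | ⟨x, xs⟩
          · simp at hx
          · have hl : List.replicate (k' + 1 + 1) p ++ d :: u = p :: p :: x :: xs := by
              simp [List.replicate_succ, hx]
            rw [hl, pvWin]
            simp only [bne_self_eq_false, Bool.false_and, Bool.false_or]
            have h2 : p :: p :: x :: xs = p :: (List.replicate (k' + 1) p ++ d :: u) := by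
              simp [List.replicate_succ, hx]
            rw [show pvWin (p :: p :: x :: xs) = pvWin (p :: (List.replicate (k' + 1) p ++ d :: u)) from by rw [h2]]
            exact ih u p d hd

-- the window value of q :: p^cnt ++ d :: u for q ≠ p, d ≠ p: true iff cnt = 2, else the tail's value
theorem pvWin_run (u : List Char) (p q d : Char) (cnt : Nat) (h1 : 1 ≤ cnt)
    (hq : q ≠ p) (hd : d ≠ p) :
    pvWin (q :: (List.replicate cnt p ++ (d :: u)))
      = (decide (cnt = 2) || pvWin (p :: d :: u)) := by
  have hqp : (q != p) = true := by simp [hq]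
  have hpd : (p == d) = false := by simp [Ne.symm hd]
  match cnt, h1 with
  | 1, _ =>
      cases u with
      | nil => simp [pvWin]
      | cons u0 u' => simp [pvWin, hpd]
  | 2, _ =>
      simp [pvWin, List.replicate_succ, hqp]
      exact Or.inl (Ne.symm hd)
  | (k + 3), _ =>
      have hl : (q : Char) :: (List.replicate (k + 3) p ++ d :: u)
          = q :: p :: p :: (p :: (List.replicate k p ++ d :: u)) := by
        simp [List.replicate_succ]
      rw [hl, pvWin]
      simp only [bne_self_eq_false, Bool.and_false, Bool.false_or]
      have h2 : (p : Char) :: p :: p :: (List.replicate k p ++ d :: u)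
          = p :: (List.replicate (k + 2) p ++ d :: u) := by
        simp [List.replicate_succ]
      rw [h2, pvWin_replicate (k + 2) u p d hd]
      simp

-- invariant of A's inner loop against the padded-window reading
theorem pvInvA (s : List Char) : ∀ (cnt : Nat) (p : Char) (has : Bool) (q : Char),
    1 ≤ cnt → q ≠ p → p ≠ '\x00' → (∀ c ∈ s, c ≠ '\x00') →
    (if (List.foldl pvStepA (cnt, some p, has) s).1 = 2 then true
     else (List.foldl pvStepA (cnt, some p, has) s).2.2)
      = (has || pvWin (q :: (List.replicate cnt p ++ (s ++ [('\x00' : Char)])))) := by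
  induction s with
  | nil =>
      intro cnt p has q h1 hq hp _
      rw [show ([] : List Char) ++ ['\x00'] = [('\x00' : Char)] from rfl]
      rw [pvWin_run [] p q '\x00' cnt h1 hq (Ne.symm hp)]
      simp only [List.foldl_nil]
      rw [show pvWin [p, '\x00'] = false from by simp [pvWin]]
      by_cases h2 : cnt = 2 <;> simp [h2]
  | cons d t ih =>
      intro cnt p has q h1 hq hp hs
      by_cases hdp : d = p
      · subst hdp
        rw [List.foldl_cons, show pvStepA (cnt, some d, has) d = (cnt + 1, some d, has) from by
          simp [pvStepA]]
        rw [ih (cnt + 1) d has q (by omega) hq hp (fun c hc => hs c (List.mem_cons_of_mem _ hc))]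
        congr 2
        simp [List.replicate_succ', List.append_assoc]
      · rw [List.foldl_cons, show pvStepA (cnt, some p, has) d
            = (1, some d, if cnt = 2 then true else has) from by simp [pvStepA, hdp]]
        rw [ih 1 d (if cnt = 2 then true else has) p (by omega) (Ne.symm hdp)
              (hs d (List.mem_cons_self)) (fun c hc => hs c (List.mem_cons_of_mem _ hc))]
        rw [show List.replicate cnt p ++ (d :: t ++ [('\x00' : Char)])
            = List.replicate cnt p ++ (d :: (t ++ [('\x00' : Char)])) from by simp]
        rw [pvWin_run (t ++ ['\x00']) p q d cnt h1 hq hdp]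
        rw [show List.replicate 1 d ++ (t ++ [('\x00' : Char)]) = d :: (t ++ ['\x00']) from by simp]
        by_cases h2 : cnt = 2 <;> simp [h2]

theorem pvCheckA_eq_B (s : List Char) (hs : ∀ c ∈ s, c ≠ '\x00') :
    pvCheckA s = pvCheckB s := by
  unfold pvCheckB
  rw [pvZip4_any_eq]
  cases s with
  | nil => simp [pvCheckA, pvWin]
  | cons c rest =>
      have hc0 : c ≠ '\x00' := hs c List.mem_cons_self
      unfold pvCheckA
      rw [List.foldl_cons, show pvStepA (0, none, false) c = (1, some c, false) from by
        simp [pvStepA]]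
      rw [pvInvA rest 1 c false '\x00' (by omega) (Ne.symm hc0) hc0
            (fun x hx => hs x (List.mem_cons_of_mem _ hx))]
      simp

-- ===== VERDICT (by name: the statement is the Claim_ definition above) =====
theorem filter_adjacent_spec : Claim_equal_filter_adjacent := by
  intro keys hdom
  unfold Spec_filter_adjacent filter_adjacent filter_adjacent_alt
  rw [PySem.List.foldl_append_if_eq_filter, PySem.List.foldl_append_if_eq_filter]
  refine congrArg _ (List.filter_congr ?_)
  intro key hk
  apply pvCheckA_eq_B
  intro c hc hc0
  have h1 : pvDomStr key = true := by
    have := List.all_eq_true.mp hdom key hk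
    simpa using this
  have h2 : pvDomChar c = true := List.all_eq_true.mp h1 c hc
  subst hc0
  simp [pvDomChar] at h2
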